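/- GENERATED by mk_final_copies.py from the proof of the farm's unit `codebook_decode_deinterleave_repeat.3` (farm:codebook_decode_deinterleave_repeat.3.2: Proof.lean) as the
   re-elaboration sweep compiled it — do not edit. -/
import Asan.CheckWalk
import Vorbis.Spec.Units.codebook_decode_deinterleave_repeat_3
import Vorbis.Spec.Worked.codebook_decode_deinterleave_repeat_3_Lemmas

open X86 X86.User Asan Vorbis Vorbis.Spec Vorbis.Spec.codebook_decode_deinterleave_repeat_3

set_option maxRecDepth 4000
set_option maxHeartbeats 8000000

/-- Segment 3 of `codebook_decode_deinterleave_repeat` (the sequence arm: `last := 0.0`, `i := 0`, loop 1938): from `AtSeq`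
(10DD59H) to `AtJoin` (10DE04H). The loop invariant is `MemInv` of the memory (Lemmas.lean) + the registers r12 = c, r14 = z·dim,
r15 = effective, r13 = i, ebp = c_inter, the slot `[rsp+8]` = p_inter and `Res.DeintInner`; measure `effective − i`. The body is
walked in four pieces (loop head → chk8 → chk9 → chk10 → loop head) so that each element address is restated as a number
before the check that uses it. -/
theorem Vorbis.Spec.Worked.codebook_decode_deinterleave_repeat_3_ok : Vorbis.Spec.codebook_decode_deinterleave_repeat_3.Statement := by
  intro Lay hLay μ hμ u₀ hcode h8 h4 others frames Blk len ret e u ci pi eff zd td hat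
  obtain ⟨hrip, hcommon, hlocals, hzd, hround⟩ := hat
  have hmi0 : MemInv others frames Blk len u₀ ret e td u.mem := MemInv.of_common hcommon hlocals
  have hpre := hcommon.pre
  have hc := hcommon.c
  have he := hcommon.mid.atEntry
  have hrsp := hcommon.mid.rsp
  have hinv := hcommon.mid.inv
  have piSlot := hlocals.piSlot
  have ciReg := hlocals.ciReg
  have effReg := hlocals.effReg
  have he0 := he
  v_entry he
  have hdf := hinv.1
  have hmx := hinv.2
  have hsse := Vorbis.sseOK_of_abiInv hinv
  have hspan : Mem.EqOn Vorbis.L.textLo Vorbis.L.textHi u₀.mem u.mem := hcommon.mid.code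
  clear hcommon hlocals
  -- 10DD59H: `last := 0.0` (C line 1902), `i := 0`, jump to the loop head 10DCC6H
  u_walk hcode [hμ.vendor] until [Vorbis.L.codebook_decode_deinterleave_repeat.loop1] span [Vorbis.L.textLo, Vorbis.L.textHi] side (v_side)
  -- the loop head 10DCC6H (C line 1938): the invariant
  have hrsp' : s_10dd67.reg .rsp = e.reg .rsp - 104 := by
    rw [w_kept .rsp rfl]
    exact hrsp
  have hr12 : s_10dd67.reg .r12 = e.reg .rsi := by
    rw [w_kept .r12 rfl]
    exact hc
  have hr14 : s_10dd67.reg .r14 = UInt64.ofNat zd := by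
    rw [w_kept .r14 rfl]
    exact hzd
  have hr15 : s_10dd67.reg .r15 = UInt64.ofNat eff := by
    rw [w_kept .r15 rfl]
    exact effReg
  have hmi : MemInv others frames Blk len u₀ ret e td s_10dd67.mem := by
    refine hmi0.step hpre he_room (ws := [⟨(e.reg .rsp).toNat - 112, (e.reg .rsp).toNat - 92⟩]) ?_ ?_
    · u_same
    · intro w hw
      rw [List.mem_singleton.mp hw]
      exact OffAll.scratch hpre he_room
  have hdf' : s_10dd67.flags.get Flag.df = false := by
    rw [w_flags]
    exact hdf
  have hmx' : s_10dd67.mxcsr &&& 8064 = 8064 := by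
    rw [w_mxcsr]
    exact hmx
  obtain ⟨i, c, p, hr13, hrbp, hpi, hin⟩ : ∃ i c p : Nat, s_10dd67.reg .r13 = UInt64.ofNat i ∧
      s_10dd67.reg .rbp = UInt64.ofNat c ∧ s_10dd67.mem.readLE (e.reg .rsp - 96) 4 = p ∧
      Res.DeintInner c p (Deint.chOf e) (Deint.lenOf e) (pi * Deint.chOf e + ci) eff i := by
    refine ⟨0, ci, pi, ?_, ?_, ?_, Res.DeintInner.init hround.inter hround.room⟩
    · rw [w_r13]
      exact zero32
    · rw [w_kept .rbp rfl]
      exact ciReg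
    · u_frame piSlot
  clear w_mem w_flags w_r13 w_kept w_mxcsr hrsp hc hzd effReg ciReg hdf hmx hsse hinv piSlot hspan hmi0
  u_loop [i, c, p] (fun v => eff - (v.reg .r13).toNat)
  -- the facts of the loop head the body's loads and checks use
  have outsSlot := hmi.outsSlot
  have chSlot := hmi.chSlot
  have hunE : Mem.EqOn 0xC00000 0xE00000 e.mem s_10dd67.mem := hmi.untouched
  have hcw := where_book hpre he_room
  have hM := hmi.read_mult
  have hK1 := hpre.book.cb.K1.dim_le
  have heff31 : eff < 2 ^ 31 := by
    have := hround.eff_le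
    simp only [Deint.dimOf, Deint.cOf] at this
    omega
  have hi31 : i < 2 ^ 31 := by
    have := hin.i_le
    omega
  have hcch : c < Deint.chOf e := hin.c_lt
  have hch16 : Deint.chOf e ≤ 16 := hpre.ch_le
  -- 10DCC6H `cmp r13d, r15d ; jge 10DE04H`, then the first check and the address of `multiplicands[z·dim + i]`
  u_walk hcode [hμ.vendor] until [Vorbis.L.codebook_decode_deinterleave_repeat.chk8, Vorbis.L.codebook_decode_deinterleave_repeat.cut8] span [Vorbis.L.textLo, Vorbis.L.textHi] side (v_side)
  · -- check 10DCD4H: the field `c->multiplicands` (C line 1939)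
    have hun' : ShadowUntouched e.mem s_10dcd4.mem := by v_untouched
    exact check_site hpre.args hun' (site_field_mult hpre) (by u_omega)
  · -- the exit 10DE04H (`i ≥ effective`): `AtJoin` with the position reached
    rw [deint3_part32_toInt_small eff heff31, deint3_part32_toInt_small i hi31] at hbr_10dcc9
    have hie : i = eff := by
      have := hin.i_le
      omega
    rw [hie] at hin
    refine ReachVia.done (Or.inl ⟨c, p, ?_⟩)
    refine ⟨w_rip, ?_, ⟨?_, ?_, ?_, ?_⟩, hin.done hround.eff_pos hround.eff_le, hround.td_pos⟩
    · -- `Common`: the memory is the loop head's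
      refine MemInv.common (td := td) ?_ he0 hpre ?_ ?_ ?_
      · rw [w_mem]
        exact hmi
      · rw [w_kept .rsp rfl]
        exact hrsp'
      · v_inv
      · rw [w_kept .r12 rfl]
        exact hr12
    · rw [w_kept .rbp rfl]
      exact hrbp
    · rw [w_mem]
      exact hpi
    · rw [w_kept .r15 rfl]
      exact hr15
    · rw [w_mem]
      exact hmi.tdSlot
  · -- 10DCEDH, before the check of `multiplicands[z·dim + i]`: its address as a number
    rw [deint3_part32_toInt_small eff heff31, deint3_part32_toInt_small i hi31] at hbr_10dcc9
    have hi : i < eff := by omega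
    obtain ⟨hsm, hidx⟩ := site_mult hmi hpre hround hi
    have hMT : (addr (Codebook.multiplicands e.mem (Deint.cOf e) + 4 * (zd + i))).toNat =
        Codebook.multiplicands e.mem (Deint.cOf e) + 4 * (zd + i) := by
      have hmw := where_site hpre he_room hsm
      exact toNat_addr _ (by omega)
    have e_rbx : Word.ofBV (BitVec.signExtend 64 (BitVec.setWidth 32 (UInt64.ofNat i + UInt64.ofNat zd).toBitVec)) <<< 2 +
        UInt64.ofNat (Codebook.multiplicands e.mem (Deint.cOf e)) =
        addr (Codebook.multiplicands e.mem (Deint.cOf e) + 4 * (zd + i)) := by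
      have hmw := where_site hpre he_room hsm
      exact mult_addr i zd _ (by omega) (by omega)
    rw [e_rbx] at w_rbx w_rdi
    -- 10DCEDH … 10DD0EH: the check, `last += multiplicands[…]` (C line 1939), the address of `outputs[c_inter]` (C line 1940)
    u_walk hcode [hμ.vendor] until [Vorbis.L.codebook_decode_deinterleave_repeat.chk9] span [Vorbis.L.textLo, Vorbis.L.textHi] side (v_side)
    · -- check 10DCEDH
      have hun' : ShadowUntouched e.mem s_10dced.mem := by v_untouched
      exact check_site hpre.args hun' hsm hMT
    · -- 10DD11H, before the check of `outputs[c_inter]`: its address as a number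
      have hTw := where_table hpre he_room
      have hAT : (addr (Deint.outsOf e + 8 * c)).toNat = Deint.outsOf e + 8 * c := toNat_addr _ (by omega)
      have e_rbx2 : e.reg Reg.rdx + Word.ofBV (BitVec.signExtend 64 (Word.part Width.w32 (UInt64.ofNat c))) * 8 =
          addr (Deint.outsOf e + 8 * c) := table_addr (e.reg .rdx) c (by omega) (by simp only [Deint.outsOf] at hTw; omega)
      rw [e_rbx2] at w_rbx w_rdi
      have hQ := hmi.read_table hcch
      have hplen : p < Deint.lenOf e := (hin.store_ok hi).2
      have hlen : Deint.lenOf e ≤ 4096 := hpre.len_le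
      clear hMT hcw
      -- 10DD11H … 10DD27H: the check, `if (outputs[c_inter])` (C line 1940), the address of `outputs[c_inter][p_inter]`
      u_walk hcode [hμ.vendor] until [Vorbis.L.codebook_decode_deinterleave_repeat.chk10, Vorbis.L.codebook_decode_deinterleave_repeat.loop1] span [Vorbis.L.textLo, Vorbis.L.textHi] side (v_side)
      · -- check 10DD11H
        have hun' : ShadowUntouched e.mem s_10dd11.mem := by v_untouched
        exact check_site hpre.args hun' (site_table hpre hcch) hAT
      · -- the back edge, `outputs[c_inter] = NULL`, `++c_inter ≠ ch` (C line 1942)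
        have hwrap : ¬ c + 1 = Deint.chOf e := by
          rw [counter_succ_toNat c (by omega)] at hbr_10dd44
          omega
        u_loop_back [i + 1, c + 1, p]
        · rw [w_kept .r12 rfl]
          exact hr12
        · rw [w_kept .r14 rfl]
          exact hr14
        · rw [w_kept .r15 rfl]
          exact hr15
        · -- `MemInv`: the body stored into the scratch window only
          refine hmi.step hpre he_room (ws := [⟨(e.reg .rsp).toNat - 112, (e.reg .rsp).toNat - 92⟩]) ?_ ?_
          · u_same
          · intro w hw
            rw [List.mem_singleton.mp hw]
            exact OffAll.scratch hpre he_room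
        · rw [w_flags]
          simp only [X86.User.df_setStatus]
          exact w_df_10dd11
        · rw [w_mxcsr]
          exact hmx_10dcf8
        · rw [w_r13]
          exact counter_succ i (by omega)
        · rw [w_rbp]
          exact counter_succ c (by omega)
        · have hs := hin.step hi
          rw [if_neg hwrap, if_neg hwrap] at hs
          exact hs
        · -- the measure `effective − i`
          rw [w_r13, counter_succ i (by omega), UInt64.toNat_ofNat', UInt64.toNat_ofNat']
          omega
      · -- the back edge, `outputs[c_inter] = NULL`, `++c_inter = ch`: `c_inter := 0`, `++p_inter`
        have hwrap : c + 1 = Deint.chOf e := by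
          rw [counter_succ_toNat c (by omega)] at hbr_10dd44
          omega
        u_loop_back [i + 1, 0, p + 1]
        · rw [w_kept .r12 rfl]
          exact hr12
        · rw [w_kept .r14 rfl]
          exact hr14
        · rw [w_kept .r15 rfl]
          exact hr15
        · -- `MemInv`: the body stored into the scratch window only
          refine hmi.step hpre he_room (ws := [⟨(e.reg .rsp).toNat - 112, (e.reg .rsp).toNat - 92⟩]) ?_ ?_
          · u_same
          · intro w hw
            rw [List.mem_singleton.mp hw]
            exact OffAll.scratch hpre he_room
        · rw [w_flags]
          simp only [X86.User.df_setStatus]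
          exact w_df_10dd11
        · rw [w_mxcsr]
          exact hmx_10dcf8
        · rw [w_r13]
          exact counter_succ i (by omega)
        · rw [w_rbp]
          exact zero32
        · -- `[rsp+8]` = p_inter + 1
          rw [w_mem, Mem.readLE_writeLE_same _ _ _ _ (by decide)]
          rw [slot_succ p (by omega)]
          omega
        · have hs := hin.step hi
          rw [if_pos hwrap, if_pos hwrap] at hs
          exact hs
        · -- the measure `effective − i`
          rw [w_r13, counter_succ i (by omega), UInt64.toNat_ofNat', UInt64.toNat_ofNat']
          omega
      · -- 10DD2AH, before the check of `outputs[c_inter][p_inter]`: its address as a number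
        have hq : e.mem.ptr (Deint.outsOf e + 8 * c) ≠ 0 := by
          intro h0
          apply hbr_10dd1c
          rw [h0]
          rfl
        have hCw := where_win hpre he_room hcch hq (by omega)
        have hCT : (addr (e.mem.ptr (Deint.outsOf e + 8 * c) + 4 * p)).toNat = e.mem.ptr (Deint.outsOf e + 8 * c) + 4 * p :=
          toNat_addr _ (by omega)
        have e_rbx3 : UInt64.ofNat (e.mem.ptr (Deint.outsOf e + 8 * c)) +
            Word.ofBV (BitVec.signExtend 64 (BitVec.ofNat 32 p)) * 4 =
            addr (e.mem.ptr (Deint.outsOf e + 8 * c) + 4 * p) := cell_addr _ p (by omega) (by omega)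
        rw [e_rbx3] at w_rbx w_rdi
        clear hTw hAT hQ
        -- 10DD2AH … 10DD54H: the check, `outputs[c_inter][p_inter] += val` (C line 1941), `++c_inter` (C line 1942), `++i`
        u_walk hcode [hμ.vendor] until [Vorbis.L.codebook_decode_deinterleave_repeat.loop1] span [Vorbis.L.textLo, Vorbis.L.textHi] side (v_side)
        · -- check 10DD2AH
          have hun' : ShadowUntouched e.mem s_10dd2a.mem := by v_untouched
          exact check_site hpre.args hun' (site_cell hpre hcch hq hplen) hCT
        · -- the back edge, one float stored, `++c_inter ≠ ch`
          have hwrap : ¬ c + 1 = Deint.chOf e := by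
            rw [counter_succ_toNat c (by omega)] at hbr_10dd44
            omega
          u_loop_back [i + 1, c + 1, p]
          · rw [w_kept .r12 rfl]
            exact hr12
          · rw [w_kept .r14 rfl]
            exact hr14
          · rw [w_kept .r15 rfl]
            exact hr15
          · -- `MemInv`: the body stored into the scratch window and one float only
            refine hmi.step hpre he_room (ws := [⟨(e.reg .rsp).toNat - 112, (e.reg .rsp).toNat - 92⟩,
              ⟨e.mem.ptr (Deint.outsOf e + 8 * c) + 4 * p, e.mem.ptr (Deint.outsOf e + 8 * c) + 4 * p + 4⟩]) ?_ ?_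
            · u_same
            · intro w hw
              simp only [List.mem_cons, List.mem_nil_iff, or_false] at hw
              rcases hw with hw | hw
              · rw [hw]
                exact OffAll.scratch hpre he_room
              · rw [hw]
                exact OffAll.cell hpre he_room hcch hq hplen
          · rw [w_flags]
            simp only [X86.User.df_setStatus]
            exact w_df_10dd2a
          · rw [w_mxcsr]
            exact hmx_10dd35
          · rw [w_r13]
            exact counter_succ i (by omega)
          · rw [w_rbp]
            exact counter_succ c (by omega)
          · have hs := hin.step hi
            rw [if_neg hwrap, if_neg hwrap] at hs
            exact hs
          · -- the measure `effective − i`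
            rw [w_r13, counter_succ i (by omega), UInt64.toNat_ofNat', UInt64.toNat_ofNat']
            omega
        · -- the back edge, one float stored, `++c_inter = ch`: `c_inter := 0`, `++p_inter`
          have hwrap : c + 1 = Deint.chOf e := by
            rw [counter_succ_toNat c (by omega)] at hbr_10dd44
            omega
          u_loop_back [i + 1, 0, p + 1]
          · rw [w_kept .r12 rfl]
            exact hr12
          · rw [w_kept .r14 rfl]
            exact hr14
          · rw [w_kept .r15 rfl]
            exact hr15
          · -- `MemInv`: the body stored into the scratch window and one float only
            refine hmi.step hpre he_room (ws := [⟨(e.reg .rsp).toNat - 112, (e.reg .rsp).toNat - 92⟩,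
              ⟨e.mem.ptr (Deint.outsOf e + 8 * c) + 4 * p, e.mem.ptr (Deint.outsOf e + 8 * c) + 4 * p + 4⟩]) ?_ ?_
            · u_same
            · intro w hw
              simp only [List.mem_cons, List.mem_nil_iff, or_false] at hw
              rcases hw with hw | hw
              · rw [hw]
                exact OffAll.scratch hpre he_room
              · rw [hw]
                exact OffAll.cell hpre he_room hcch hq hplen
          · rw [w_flags]
            simp only [X86.User.df_setStatus]
            exact w_df_10dd2a
          · rw [w_mxcsr]
            exact hmx_10dd35
          · rw [w_r13]
            exact counter_succ i (by omega)
          · rw [w_rbp]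
            exact zero32
          · -- `[rsp+8]` = p_inter + 1
            rw [w_mem, Mem.readLE_writeLE_same _ _ _ _ (by decide)]
            rw [slot_succ p (by omega)]
            omega
          · have hs := hin.step hi
            rw [if_pos hwrap, if_pos hwrap] at hs
            exact hs
          · -- the measure `effective − i`
            rw [w_r13, counter_succ i (by omega), UInt64.toNat_ofNat', UInt64.toNat_ofNat']
            omega
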